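-- pv_equiv track=rewrite | github.com/jpspark10/pylabs | 2sem/lab3/task2/password_checker.py | check_keyboard_sequences
-- ===== SOURCE A (Python) =====
-- KEYBOARD_SEQUENCES = [
--     "qwertyuiop", "asdfghjkl", "zxcvbnm",
--     "йцукенгшщзхъ", "фывапролджэ", "ячсмитьбю",
--     "QWERTYUIOP", "ASDFGHJKL", "ZXCVBNM",
--     "ЙЦУКЕНГШЩЗХЪ", "ФЫВАПРОЛДЖЭ", "ЯЧСМИТЬБЮ"
-- ]
--
-- def check_keyboard_sequences(password):
--     lower_password = password.lower()
--     for seq in KEYBOARD_SEQUENCES: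
--         seq = seq.lower()
--         for i in range(len(seq) - 2):
--             if seq[i:i + 3] in lower_password:
--                 return False
--     return True
-- ===== SOURCE B (Python) =====
-- KEYBOARD_SEQUENCES = [
--     "qwertyuiop", "asdfghjkl", "zxcvbnm",
--     "йцукенгшщзхъ", "фывапролджэ", "ячсмитьбю",
--     "QWERTYUIOP", "ASDFGHJKL", "ZXCVBNM",
--     "ЙЦУКЕНГШЩЗХЪ", "ФЫВАПРОЛДЖЭ", "ЯЧСМИТЬБЮ"
-- ]
--
-- # Built once at module load: every lowercased length-3 window of every sequence.
-- FORBIDDEN = {seq.lower()[i:i + 3]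
--              for seq in KEYBOARD_SEQUENCES
--              for i in range(len(seq) - 2)}
--
-- def check_keyboard_sequences(password):
--     lower = password.lower()
--     for i in range(len(lower) - 2):
--         if lower[i:i + 3] in FORBIDDEN:
--             return False
--     return True
-- ===== Notes on version B (the rewrite author's own statement) =====
-- stated objective: alternative
-- what changed: B reverses the traversal: it precomputes once, at module load, the set of all lowercased length-3 windows of the keyboard sequences, then makes a single pass over the password's 3-grams with a set lookup, instead of A's scan of the whole password once per sequence window (~81 substring searches); it trades A's C-level substring scans for one Python-level pass, so it is not measurably faster.
import Mathlib
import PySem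

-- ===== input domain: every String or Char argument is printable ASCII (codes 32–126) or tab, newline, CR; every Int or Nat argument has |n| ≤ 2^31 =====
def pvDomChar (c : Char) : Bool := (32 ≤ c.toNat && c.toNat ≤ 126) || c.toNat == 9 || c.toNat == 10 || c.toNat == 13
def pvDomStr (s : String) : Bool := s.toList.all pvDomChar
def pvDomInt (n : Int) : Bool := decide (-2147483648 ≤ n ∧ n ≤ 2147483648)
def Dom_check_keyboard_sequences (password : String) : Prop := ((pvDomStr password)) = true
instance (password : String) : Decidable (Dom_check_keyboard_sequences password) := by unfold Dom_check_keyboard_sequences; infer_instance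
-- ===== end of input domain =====

-- B reverses the traversal: a single pass over the password's 3-grams against a set of
-- forbidden 3-grams precomputed from the sequences (objective: alternative decomposition).

-- ===== PORT A =====
def KEYBOARD_SEQUENCES : List String := [
    "qwertyuiop", "asdfghjkl", "zxcvbnm",
    "йцукенгшщзхъ", "фывапролджэ", "ячсмитьбю",
    "QWERTYUIOP", "ASDFGHJKL", "ZXCVBNM",
    "ЙЦУКЕНГШЩЗХЪ", "ФЫВАПРОЛДЖЭ", "ЯЧСМИТЬБЮ"
]

-- literal port of A: for each sequence, for each i, early-return False when seq[i:i+3] in lower_password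
def check_keyboard_sequences (password : String) : Bool :=
  let lower_password := PySem.Str.lower password
  !(KEYBOARD_SEQUENCES.any (fun seq0 =>
      let seq := PySem.Str.lower seq0
      (PySem.List.pyRange 0 (PySem.Str.len seq - 2) 1).any (fun i =>
        PySem.Str.isIn (PySem.Str.slice seq (some i) (some (i + 3))) lower_password)))

-- ===== PORT B =====
-- all length-3 windows of a char list (the 3-gram slices seq[i:i+3], i in range(len(seq)-2))
def pvWindows3 (s : List Char) : List (List Char) :=
  (List.range (s.length - 2)).map (fun i => (s.drop i).take 3)

-- module-level constant of Source B: the set of every lowercased 3-gram of every sequence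
def FORBIDDEN : PySem.Set (List Char) :=
  PySem.Set.ofList (KEYBOARD_SEQUENCES.flatMap (fun seq => pvWindows3 (PySem.Chars.lower seq.toList)))

-- port of B: one pass over the password's 3-grams, table lookup
def check_keyboard_sequences_alt (password : String) : Bool :=
  let lower := PySem.Chars.lower password.toList
  !((List.range (lower.length - 2)).any (fun i =>
      PySem.Set.contains FORBIDDEN ((lower.drop i).take 3)))

-- ===== PRECONDITION & SPEC =====
def Spec_check_keyboard_sequences (password : String) (out : Bool) : Prop := out = check_keyboard_sequences_alt password
instance (password : String) (out : Bool) : Decidable (Spec_check_keyboard_sequences password out) := by unfold Spec_check_keyboard_sequences; infer_instance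

-- ===== CLAIM (what is proved, stated in full; the proofs are below) =====
def Claim_equal_check_keyboard_sequences : Prop := ∀ (password : String), Dom_check_keyboard_sequences password → Spec_check_keyboard_sequences password (check_keyboard_sequences password)

-- ===== LEMMAS AND PROOFS =====

-- the i-loop of A over seq produces exactly the 3-gram windows of seq's char list
lemma pyRange_slices_eq_windows3 (s : String) :
    (PySem.List.pyRange 0 (PySem.Str.len s - 2) 1).map
      (fun i => (PySem.Str.slice s (some i) (some (i + 3))).toList)
    = pvWindows3 s.toList := by
  rw [PySem.Str.len_eq]
  by_cases h : 2 ≤ s.toList.length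
  · have hc : (s.toList.length : Int) - 2 = ((s.toList.length - 2 : Nat) : Int) := by omega
    rw [hc, PySem.List.pyRange_zero_natCast, List.map_map]
    unfold pvWindows3
    apply List.map_congr_left
    intro j hj
    simp only [Function.comp_apply, PySem.Str.toList_slice, PySem.Chars.slice_eq_listSlice]
    have h3 : ((j : Int) + 3) = ((j : Int) + ((3 : Nat) : Int)) := by norm_num
    rw [h3, PySem.List.slice_natCast_add]
  · have h0 : s.toList.length - 2 = 0 := by omega
    have hnil : PySem.List.pyRange 0 ((s.toList.length : Int) - 2) 1 = [] := by
      apply List.eq_nil_iff_forall_not_mem.mpr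
      intro x hx
      have := PySem.List.mem_pyRange_one.mp hx
      omega
    rw [hnil]
    unfold pvWindows3
    rw [h0]
    simp

-- every window produced by pvWindows3 has length 3
lemma length_of_mem_windows3 (s : List Char) (t : List Char) (ht : t ∈ pvWindows3 s) :
    t.length = 3 := by
  unfold pvWindows3 at ht
  simp only [List.mem_map, List.mem_range] at ht
  obtain ⟨i, hi, rfl⟩ := ht
  simp only [List.length_take, List.length_drop]
  omega

-- Set.ofList dedups but keeps membership: containment test against the set equals one against the list
lemma contains_ofList {a : Type} [BEq a] [LawfulBEq a] (xs : List a) (y : a) :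
    PySem.Set.contains (PySem.Set.ofList xs) y = xs.contains y := by
  apply Bool.eq_iff_iff.mpr
  constructor
  · intro h
    exact List.contains_iff_mem.mpr ((PySem.Set.mem_ofList xs y).mp (List.contains_iff_mem.mp h))
  · intro h
    exact List.contains_iff_mem.mpr ((PySem.Set.mem_ofList xs y).mpr (List.contains_iff_mem.mp h))

-- core: "some t in T is a substring of L" = "some 3-gram of L is in T", for 3-letter t's
lemma any_isIn_eq_any_window (T : List (List Char)) (L : List Char)
    (h3 : ∀ t ∈ T, t.length = 3) :
    (T.any (fun t => PySem.Chars.isIn t L))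
      = ((List.range (L.length - 2)).any (fun i => T.contains ((L.drop i).take 3))) := by
  apply Bool.eq_iff_iff.mpr
  simp only [List.any_eq_true, List.contains_iff_mem, List.mem_range]
  constructor
  · rintro ⟨t, htT, hin⟩
    obtain ⟨j, hp⟩ := (PySem.Chars.exists_prefix_drop_iff_isIn t L).mpr hin
    have hlen := h3 t htT
    have hteq := List.prefix_iff_eq_take.mp hp
    have hle : t.length ≤ (L.drop j).length := hp.length_le
    rw [List.length_drop] at hle
    refine ⟨j, by omega, ?_⟩
    rw [hlen] at hteq
    rwa [← hteq]
  · rintro ⟨i, _, hmem⟩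
    exact ⟨_, hmem, (PySem.Chars.exists_prefix_drop_iff_isIn _ _).mp ⟨i, List.take_prefix _ _⟩⟩

-- ===== VERDICT (by name: the statement is the Claim_ definition above) =====
theorem check_keyboard_sequences_spec : Claim_equal_check_keyboard_sequences := by
  intro password _
  unfold Spec_check_keyboard_sequences check_keyboard_sequences check_keyboard_sequences_alt FORBIDDEN
  simp only []
  congr 1
  have hA : ∀ seq0 : String,
      ((PySem.List.pyRange 0 (PySem.Str.len (PySem.Str.lower seq0) - 2) 1).any (fun i =>
          PySem.Str.isIn (PySem.Str.slice (PySem.Str.lower seq0) (some i) (some (i + 3)))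
            (PySem.Str.lower password)))
      = (pvWindows3 (PySem.Chars.lower seq0.toList)).any
          (fun t => PySem.Chars.isIn t (PySem.Chars.lower password.toList)) := by
    intro seq0
    rw [← PySem.Str.toList_lower seq0, ← pyRange_slices_eq_windows3 (PySem.Str.lower seq0),
        List.any_map]
    simp only [PySem.Str.isIn_eq, PySem.Str.toList_lower]
    rfl
  calc (KEYBOARD_SEQUENCES.any (fun seq0 =>
          (PySem.List.pyRange 0 (PySem.Str.len (PySem.Str.lower seq0) - 2) 1).any (fun i =>
            PySem.Str.isIn (PySem.Str.slice (PySem.Str.lower seq0) (some i) (some (i + 3)))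
              (PySem.Str.lower password))))
      = (KEYBOARD_SEQUENCES.flatMap (fun seq => pvWindows3 (PySem.Chars.lower seq.toList))).any
          (fun t => PySem.Chars.isIn t (PySem.Chars.lower password.toList)) := by
        rw [List.any_flatMap]
        simp only [hA]
    _ = (List.range ((PySem.Chars.lower password.toList).length - 2)).any (fun i =>
          PySem.Set.contains FORBIDDEN (((PySem.Chars.lower password.toList).drop i).take 3)) := by
        rw [any_isIn_eq_any_window _ _ (fun t ht => by
          obtain ⟨seq, _, hw⟩ := List.mem_flatMap.mp ht
          exact length_of_mem_windows3 _ _ hw)]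
        unfold FORBIDDEN
        simp only [contains_ofList]
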